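-- pv_equiv track=rewrite | github.com/EugGolovanov/WDC_extraction | WDC.py | coords_from_mask
-- ===== SOURCE A (Python) =====
-- def coords_from_mask(mask):
--     x, y = [], []
--     for i in range(len(mask[0])):
--         for j in range(len(mask)):
--             if mask[j][i] == 255:
--                 x.append(i);y.append(len(mask)-j)
--                 break
--     return x, y
-- ===== SOURCE B (Python) =====
-- def coords_from_mask(mask):
--     w = len(mask[0])
--     h = len(mask)
--     topmost = [None] * w
--     for j in range(h):
--         row = mask[j]
--         for i in range(w):
--             if topmost[i] is None and row[i] == 255:
--                 topmost[i] = j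
--     x, y = [], []
--     for i in range(w):
--         if topmost[i] is not None:
--             x.append(i)
--             y.append(h - topmost[i])
--     return x, y
-- ===== Notes on version B (the rewrite author's own statement) =====
-- stated objective: alternative
-- what changed: Replaces the column-major scan-with-break by a single row-major pass that records the topmost 255 of each column in an array, then emits the coordinates in column order.
-- outside the precondition, e.g. on coords_from_mask([[255, 255], [0]]): A returns ([0, 1], [2, 2]), B returns ([0, 1], [2, 2])
import Mathlib
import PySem

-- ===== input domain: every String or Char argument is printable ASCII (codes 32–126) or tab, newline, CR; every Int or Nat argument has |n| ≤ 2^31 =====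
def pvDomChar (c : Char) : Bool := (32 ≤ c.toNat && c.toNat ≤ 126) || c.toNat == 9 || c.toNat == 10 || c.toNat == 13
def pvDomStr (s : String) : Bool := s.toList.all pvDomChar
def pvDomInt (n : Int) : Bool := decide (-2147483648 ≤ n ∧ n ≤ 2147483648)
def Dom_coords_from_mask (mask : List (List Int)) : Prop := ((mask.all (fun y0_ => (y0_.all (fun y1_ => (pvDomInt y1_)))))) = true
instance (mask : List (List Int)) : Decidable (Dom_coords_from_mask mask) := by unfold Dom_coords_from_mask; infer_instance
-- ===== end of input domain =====

-- B replaces A's column-major scan-with-break by one row-major pass recording each column's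
-- topmost 255 in an array, then emits in column order (alternative decomposition, same cost).


-- ===== PORT A =====
-- A's inner 'for j in range(len(mask)): if mask[j][i]==255: …; break' = first j in the range that hits
def scanCol (mask : List (List Int)) (i : Int) : List Int → Option Int
  | [] => none
  | j :: js =>
    if PySem.List.pyGetD (PySem.List.pyGetD mask j []) i 0 = 255 then some j
    else scanCol mask i js

def coords_from_mask (mask : List (List Int)) : List Int × List Int :=
  (PySem.List.pyRange 0 (((PySem.List.pyGetD mask 0 []).length : Int)) 1).foldl
    (fun (xy : List Int × List Int) i =>
      match scanCol mask i (PySem.List.pyRange 0 ((mask.length : Int)) 1) with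
      | some j => (xy.1 ++ [i], xy.2 ++ [(mask.length : Int) - j])
      | none => xy)
    ([], [])

-- ===== PORT B =====
def coords_from_mask_alt (mask : List (List Int)) : List Int × List Int :=
  let w := (PySem.List.pyGetD mask 0 []).length
  let h := mask.length
  let topmost :=
    (PySem.List.pyRange 0 ((h : Int)) 1).foldl
      (fun (t : List (Option Int)) j =>
        let row := PySem.List.pyGetD mask j []
        (List.range w).foldl
          (fun t i =>
            if t.getD i none = none ∧ PySem.List.pyGetD row (i : Int) 0 = 255
            then t.set i (some j) else t)
          t)
      (List.replicate w none)
  (List.range w).foldl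
    (fun (xy : List Int × List Int) i =>
      match topmost.getD i none with
      | some j => (xy.1 ++ [(i : Int)], xy.2 ++ [(h : Int) - j])
      | none => xy)
    ([], [])

-- ===== PRECONDITION & SPEC =====
-- Pre_ restricts to non-empty rectangular-enough masks, the function's natural domain: Python A raises
-- IndexError on the empty mask (mask[0]) and, except when every column's scan breaks before reaching
-- the short row, on masks with a row shorter than the first row; those lucky ragged masks (on which A
-- and B in fact still agree, see cites) are excluded with the rest of the ragged ones.
def Pre_coords_from_mask (mask : List (List Int)) : Prop :=
  mask ≠ [] ∧ ∀ row ∈ mask, (PySem.List.pyGetD mask 0 []).length ≤ row.length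
instance (mask : List (List Int)) : Decidable (Pre_coords_from_mask mask) := by
  unfold Pre_coords_from_mask; infer_instance

def pvWitness_coords_from_mask : List (List Int) := [[255, 0], [0, 255], [255, 255]]

def Spec_coords_from_mask (mask : List (List Int)) (out : List Int × List Int) : Prop := out = coords_from_mask_alt mask
instance (mask : List (List Int)) (out : List Int × List Int) : Decidable (Spec_coords_from_mask mask out) := by unfold Spec_coords_from_mask; infer_instance

-- ===== CLAIM (what is proved, stated in full; the proofs are below) =====
def Claim_equal_coords_from_mask : Prop := ∀ (mask : List (List Int)), Dom_coords_from_mask mask → Pre_coords_from_mask mask → Spec_coords_from_mask mask (coords_from_mask mask)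

-- ===== LEMMAS AND PROOFS =====

-- The inner row pass only writes position i at the step for index i, so its effect on each cell is pointwise.
theorem inner_length (c : Nat → Prop) [DecidablePred c] (j : Int)
    (l : List Nat) (t : List (Option Int)) :
    (l.foldl (fun t i => if t.getD i none = none ∧ c i then t.set i (some j) else t) t).length
      = t.length := by
  induction l generalizing t with
  | nil => rfl
  | cons a l ih =>
    simp only [List.foldl_cons]
    rw [ih]
    split_ifs <;> simp

theorem inner_getD (c : Nat → Prop) [DecidablePred c] (j : Int)
    (l : List Nat) (t : List (Option Int)) (hnd : l.Nodup)
    (hlt : ∀ x ∈ l, x < t.length) (i : Nat) :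
    (l.foldl (fun t i => if t.getD i none = none ∧ c i then t.set i (some j) else t) t).getD i none
      = if i ∈ l ∧ t.getD i none = none ∧ c i then some j else t.getD i none := by
  induction l generalizing t with
  | nil => simp
  | cons a l ih =>
    simp only [List.foldl_cons]
    have hnd' : l.Nodup := hnd.of_cons
    have hane : a ∉ l := by simp at hnd; exact hnd.1
    have halt : a < t.length := hlt a (by simp)
    have hlen : ∀ x ∈ l, x < (if t.getD a none = none ∧ c a then t.set a (some j) else t).length := by
      intro x hx
      split_ifs <;> simpa using hlt x (by simp [hx])
    rw [ih _ hnd' hlen]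
    by_cases hia : i = a
    · subst hia
      simp only [hane, false_and, if_false, List.mem_cons, true_or, true_and]
      split_ifs with h
      · simp [List.getD, List.getElem?_set_self halt]
      · rfl
    · have hgd : (if t.getD a none = none ∧ c a then t.set a (some j) else t).getD i none
          = t.getD i none := by
        split_ifs with h
        · simp [List.getD, List.getElem?_set_ne (fun h => hia h.symm)]
        · rfl
      rw [hgd]
      simp [List.mem_cons, hia]

-- The row-major outer loop computes, per cell, the first hitting row — i.e. A's column scan.
theorem outer_getD (mask : List (List Int)) (w : Nat)
    (js : List Int) (t : List (Option Int)) (hlen : t.length = w) (i : Nat) (hi : i < w) :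
    ((js.foldl
        (fun (t : List (Option Int)) j =>
          let row := PySem.List.pyGetD mask j []
          (List.range w).foldl
            (fun t i =>
              if t.getD i none = none ∧ PySem.List.pyGetD row (i : Int) 0 = 255
              then t.set i (some j) else t)
            t)
        t).getD i none)
      = match t.getD i none with
        | some k => some k
        | none => scanCol mask (i : Int) js := by
  induction js generalizing t with
  | nil =>
    simp only [List.foldl_nil]
    cases t.getD i none <;> rfl
  | cons j js ih =>
    simp only [List.foldl_cons]
    have hlen' : ((List.range w).foldl
        (fun (t : List (Option Int)) (i : Nat) =>
          if t.getD i none = none ∧ PySem.List.pyGetD (PySem.List.pyGetD mask j []) (i : Int) 0 = 255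
          then t.set i (some j) else t) t).length = w := by
      rw [inner_length]; exact hlen
    rw [ih _ hlen']
    rw [inner_getD (fun i => PySem.List.pyGetD (PySem.List.pyGetD mask j []) (i : Int) 0 = 255) j
        (List.range w) t (List.nodup_range) (by simp [hlen]) i]
    simp only [List.mem_range, hi, true_and]
    cases h : t.getD i none with
    | some k => simp
    | none =>
      simp only [scanCol, true_and]
      split_ifs <;> rfl

theorem pyRange_zero_nat_map (n : Nat) :
    PySem.List.pyRange 0 (n : Int) 1 = (List.range n).map (fun (k : Nat) => (k : Int)) := by
  rw [PySem.List.pyRange_zero, Int.toNat_natCast]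

-- ===== VERDICT (by name: the statement is the Claim_ definition above) =====
theorem coords_from_mask_spec : Claim_equal_coords_from_mask := by
  intro mask _ _
  unfold Spec_coords_from_mask coords_from_mask coords_from_mask_alt
  set w := (PySem.List.pyGetD mask 0 []).length with hw
  have htop : ∀ i : Nat, i < w →
      (((PySem.List.pyRange 0 ((mask.length : Int)) 1).foldl
        (fun (t : List (Option Int)) j =>
          let row := PySem.List.pyGetD mask j []
          (List.range w).foldl
            (fun t i =>
              if t.getD i none = none ∧ PySem.List.pyGetD row (i : Int) 0 = 255
              then t.set i (some j) else t)
            t)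
        (List.replicate w none)).getD i none)
      = scanCol mask (i : Int) (PySem.List.pyRange 0 ((mask.length : Int)) 1) := by
    intro i hi
    rw [outer_getD mask w _ (List.replicate w none) (by simp) i hi]
    simp
  dsimp only
  rw [pyRange_zero_nat_map w, List.foldl_map]
  refine PySem.List.foldl_congr_mem _ _ _ _ ?_
  intro acc i hi
  rw [htop i (List.mem_range.mp hi)]
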